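-- pv_equiv track=rewrite | github.com/EmmaAkin/intro_to_programming | minmax_sort.py | minmax_sort
-- ===== SOURCE A (Python) =====
-- def minmax_sort(a):
--     sorted_arr = []
--     while len(a)>1:
--         min_el = min(a)
--         sorted_arr.append(min_el)
--         a.remove(min_el)
--
--         max_el = max(a)
--         sorted_arr.append(max_el)
--         a.remove(max_el)
--
--     return sorted_arr
-- ===== SOURCE B (Python) =====
-- def minmax_sort(a):
--     # Return-value equivalent to A (A empties its argument in place; B does not mutate).
--     s = sorted(a)
--     out = []
--     i, j = 0, len(s) - 1
--     while i < j:
--         out.append(s[i])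
--         out.append(s[j])
--         i += 1
--         j -= 1
--     return out
-- ===== Notes on version B (the rewrite author's own statement) =====
-- stated objective: faster
-- what changed: B sorts the list once and interleaves the sorted values from both ends with two pointers, instead of A's repeated min/max scans and removals on the shrinking list.
import Mathlib
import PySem

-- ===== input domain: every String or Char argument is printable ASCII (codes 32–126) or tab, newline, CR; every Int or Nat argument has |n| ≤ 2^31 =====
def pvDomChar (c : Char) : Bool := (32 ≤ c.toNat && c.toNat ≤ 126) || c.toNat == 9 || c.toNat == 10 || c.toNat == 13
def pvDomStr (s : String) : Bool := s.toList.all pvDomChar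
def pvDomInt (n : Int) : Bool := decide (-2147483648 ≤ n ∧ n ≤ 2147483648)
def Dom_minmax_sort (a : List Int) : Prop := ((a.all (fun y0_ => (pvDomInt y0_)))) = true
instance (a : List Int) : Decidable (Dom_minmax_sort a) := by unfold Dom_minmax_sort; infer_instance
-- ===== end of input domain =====

-- B sorts once and interleaves from both ends (two pointers) instead of A's repeated min/max
-- scans with removal; equivalence is about the RETURN value only (A empties its argument in place, B does not mutate).


-- ===== PORT A =====
-- termination helper for the while loop: a successful remove shortens the list by one
theorem pvRemoveLen {xs ys : List Int} {v : Int} (h : PySem.List.remove? xs v = some ys) :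
    ys.length + 1 = xs.length := by
  have hv : v ∈ xs := by
    by_contra hv
    rw [(PySem.List.remove?_eq_none_iff xs v).mpr hv] at h
    simp at h
  rw [PySem.List.remove?_eq_some_erase xs v hv, Option.some.injEq] at h
  subst h
  have h1 := List.length_erase_of_mem hv
  have h2 := List.length_pos_of_mem hv
  omega

-- the while loop of A: accumulator sorted_arr, repeatedly pop min then max
def minmaxLoop (a : List Int) (sorted_arr : List Int) : List Int :=
  if 1 < a.length then
    match PySem.List.min? a (fun x => x) with
    | none => sorted_arr                  -- unreachable: a ≠ [] here
    | some min_el =>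
      match h1 : PySem.List.remove? a min_el with
      | none => sorted_arr ++ [min_el]    -- unreachable: min_el ∈ a
      | some a1 =>
        match PySem.List.max? a1 (fun x => x) with
        | none => sorted_arr ++ [min_el]  -- unreachable: a1 ≠ []
        | some max_el =>
          match h2 : PySem.List.remove? a1 max_el with
          | none => sorted_arr ++ [min_el, max_el]  -- unreachable: max_el ∈ a1
          | some a2 => minmaxLoop a2 (sorted_arr ++ [min_el, max_el])
  else sorted_arr
termination_by a.length
decreasing_by
  have e1 := pvRemoveLen h1
  have e2 := pvRemoveLen h2
  omega

def minmax_sort (a : List Int) : List Int := minmaxLoop a []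

-- ===== PORT B =====
-- B's while loop: two pointers over the sorted list
def altLoop (s : List Int) (i j : Int) (out : List Int) : List Int :=
  if i < j then
    altLoop s (i + 1) (j - 1) (out ++ [PySem.List.pyGetD s i 0, PySem.List.pyGetD s j 0])
  else out
termination_by (j - i).toNat
decreasing_by omega

def minmax_sort_alt (a : List Int) : List Int :=
  altLoop (PySem.List.sorted a (fun x => x) false) 0 ((a.length : Int) - 1) []

-- ===== PRECONDITION & SPEC =====
def Spec_minmax_sort (a : List Int) (out : List Int) : Prop := out = minmax_sort_alt a
instance (a : List Int) (out : List Int) : Decidable (Spec_minmax_sort a out) := by unfold Spec_minmax_sort; infer_instance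

-- ===== CLAIM (what is proved, stated in full; the proofs are below) =====
def Claim_equal_minmax_sort : Prop := ∀ (a : List Int), Dom_minmax_sort a → Spec_minmax_sort a (minmax_sort a)

-- ===== LEMMAS AND PROOFS =====

-- the common value of both programs: interleave head/last of a (sorted) list, dropping an odd middle
def interleave : List Int → List Int
  | [] => []
  | [_] => []
  | x :: y :: rest =>
      x :: (y :: rest).getLast (by simp) :: interleave ((y :: rest).dropLast)
termination_by l => l.length
decreasing_by simp [List.length_dropLast]

theorem interleave_short {t : List Int} (h : t.length ≤ 1) : interleave t = [] := by
  match t with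
  | [] => simp [interleave]
  | [_] => simp [interleave]
  | _ :: _ :: _ => simp at h

theorem interleave_sandwich (x y : Int) (l : List Int) :
    interleave (x :: (l ++ [y])) = x :: y :: interleave l := by
  cases l with
  | nil => simp [interleave]
  | cons z zs =>
    show interleave (x :: z :: (zs ++ [y])) = _
    rw [interleave]
    have h2 : (z :: (zs ++ [y])).getLast (by simp) = y := by
      show ((z :: zs) ++ [y]).getLast (by simp) = y
      exact List.getLast_concat
    have h1 : (z :: (zs ++ [y])).dropLast = z :: zs := by
      show ((z :: zs) ++ [y]).dropLast = z :: zs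
      exact List.dropLast_concat
    simp [h1, h2]

theorem pairwise_le_getLast {t : List Int} (hp : t.Pairwise (· ≤ ·)) (h : t ≠ []) :
    ∀ y ∈ t, y ≤ t.getLast h := by
  induction t with
  | nil => simp at h
  | cons z zs ih =>
    intro y hy
    have hzs : zs.Pairwise (· ≤ ·) := hp.of_cons
    have hz : ∀ w ∈ zs, z ≤ w := (List.pairwise_cons.mp hp).1
    cases zs with
    | nil => simp at hy; simp [hy]
    | cons w ws =>
      rw [List.getLast_cons (by simp)]
      rcases hy with _ | hy'
      · exact hz _ (List.getLast_mem (by simp))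
      · exact ih hzs (by simp) y (by assumption)

theorem erase_last_perm (dl : List Int) (v : Int) : ((dl ++ [v]).erase v).Perm dl := by
  by_cases hv : v ∈ dl
  · rw [List.erase_append_left _ hv]
    exact (List.perm_append_singleton v (dl.erase v)).trans (List.perm_cons_erase hv).symm
  · rw [List.erase_append_right _ hv]
    simp

-- one iteration of A's loop peels head and last off the sorted list
theorem sorted_step (a a1 a2 : List Int) (m M : Int)
    (hlen : 1 < a.length)
    (hm : PySem.List.min? a (fun x => x) = some m)
    (h1 : PySem.List.remove? a m = some a1)
    (hM : PySem.List.max? a1 (fun x => x) = some M)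
    (h2 : PySem.List.remove? a1 M = some a2) :
    interleave (PySem.List.sorted a (fun x => x) false)
      = m :: M :: interleave (PySem.List.sorted a2 (fun x => x) false) := by
  have hma : m ∈ a := PySem.List.min?_mem hm
  have ha1 : a1 = a.erase m := by
    rw [PySem.List.remove?_eq_some_erase a m hma, Option.some.injEq] at h1
    exact h1.symm
  have hMa : M ∈ a1 := PySem.List.max?_mem hM
  have ha2 : a2 = a1.erase M := by
    rw [PySem.List.remove?_eq_some_erase a1 M hMa, Option.some.injEq] at h2
    exact h2.symm
  have hperm : (PySem.List.sorted a (fun x => x) false).Perm a := PySem.List.sorted_perm a _ false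
  have hpair : (PySem.List.sorted a (fun x => x) false).Pairwise (· ≤ ·) :=
    PySem.List.sorted_pairwise a (fun x => x)
  have hsne : PySem.List.sorted a (fun x => x) false ≠ [] := by
    intro h
    have hl := PySem.List.length_sorted a (fun x => x) false
    rw [h] at hl
    simp at hl
    omega
  obtain ⟨x, t, hxt⟩ := List.exists_cons_of_ne_nil hsne
  have hxs : x ∈ a := hperm.subset (hxt ▸ List.mem_cons_self)
  have hxm : x = m :=
    le_antisymm (PySem.List.key_head_sorted_le a (fun x => x) hxt m hma)
      (PySem.List.min?_isMin hm x hxs)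
  have htp : t.Pairwise (· ≤ ·) := by
    rw [hxt] at hpair
    exact hpair.of_cons
  have hta1 : t.Perm a1 := by
    have h3 : ((PySem.List.sorted a (fun x => x) false).erase m).Perm (a.erase m) :=
      hperm.erase m
    rw [hxt, hxm, List.erase_cons_head] at h3
    rw [ha1]
    exact h3
  have hl1 : a1.length + 1 = a.length := pvRemoveLen h1
  have htne : t ≠ [] := by
    intro h
    have := hta1.length_eq
    rw [h] at this
    simp at this
    omega
  have hgl : t.getLast htne = M :=
    le_antisymm
      (PySem.List.max?_isMax hM _ (hta1.subset (List.getLast_mem htne)))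
      (pairwise_le_getLast htp htne M (hta1.mem_iff.mpr hMa))
  have hdl : t = t.dropLast ++ [M] := by
    conv_lhs => rw [← List.dropLast_append_getLast htne]
    rw [hgl]
  have hdlp : t.dropLast.Pairwise (· ≤ ·) := htp.sublist (List.dropLast_sublist t)
  have hperm2 : t.dropLast.Perm a2 := by
    have h3 : (t.erase M).Perm (a1.erase M) := hta1.erase M
    have h4 := erase_last_perm t.dropLast M
    rw [← hdl] at h4
    rw [ha2]
    exact h4.symm.trans h3
  have hs2 : PySem.List.sorted a2 (fun x => x) false = t.dropLast :=
    PySem.List.sorted_id_eq_of_perm_of_pairwise a2 t.dropLast hperm2 hdlp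
  rw [hxt, hxm, hs2]
  conv_lhs => rw [hdl]
  exact interleave_sandwich m M t.dropLast

-- A's loop produces interleave of the sorted list
theorem loopA_eq (a out : List Int) :
    minmaxLoop a out = out ++ interleave (PySem.List.sorted a (fun x => x) false) := by
  fun_induction minmaxLoop a out with
  | case1 a out hlen hm =>
      exact absurd ((PySem.List.min?_eq_none_iff a _).mp hm ▸ hlen) (by simp)
  | case2 a out hlen m hm h1 =>
      exact absurd (PySem.List.min?_mem hm) ((PySem.List.remove?_eq_none_iff a m).mp h1)
  | case3 a out hlen m hm a1 h1 hM =>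
      have e1 := pvRemoveLen h1
      have e2 := (PySem.List.max?_eq_none_iff a1 _).mp hM
      subst e2
      simp at e1
      omega
  | case4 a out hlen m hm a1 h1 M hM h2 =>
      exact absurd (PySem.List.max?_mem hM) ((PySem.List.remove?_eq_none_iff a1 M).mp h2)
  | case5 a out hlen m hm a1 h1 M hM a2 h2 ih =>
      rw [ih, sorted_step a a1 a2 m M hlen hm h1 hM h2]
      simp
  | case6 a out hlen =>
      rw [interleave_short (by have := PySem.List.length_sorted a (fun x => x) false; omega)]
      simp

-- decompose the sorted segment s[p..q] into head, middle, last
theorem seg_decomp (s : List Int) (p q : Nat) (hpq : p < q) (hq : q < s.length) :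
    (s.drop p).take (q + 1 - p)
      = s[p] :: (((s.drop (p + 1)).take (q - p - 1)) ++ [s[q]]) := by
  have hp : p < s.length := lt_trans hpq hq
  rw [List.drop_eq_getElem_cons hp,
      show q + 1 - p = (q - p - 1 + 1) + 1 by omega,
      List.take_succ_cons]
  congr 1
  rw [List.take_add_one]
  congr 1
  have : (s.drop (p + 1))[q - p - 1]? = some s[q] := by
    rw [List.getElem?_drop, show p + 1 + (q - p - 1) = q by omega,
        List.getElem?_eq_getElem hq]
  rw [this]
  rfl

-- B's loop produces interleave of the segment s[i..j]
theorem altLoop_eq (s : List Int) (i j : Int) (out : List Int) :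
    0 ≤ i → j < (s.length : Int) →
    altLoop s i j out = out ++ interleave ((s.drop i.toNat).take (j + 1 - i).toNat) := by
  fun_induction altLoop s i j out with
  | case1 i j out hij ih =>
      intro hi hj
      rw [ih (by omega) (by omega),
          PySem.List.pyGetD_eq_getElem s 0 hi (by omega),
          PySem.List.pyGetD_eq_getElem s 0 (by omega) hj,
          show (j - 1 + 1 - (i + 1)).toNat = j.toNat - i.toNat - 1 by omega,
          show (i + 1).toNat = i.toNat + 1 by omega,
          show (j + 1 - i).toNat = j.toNat + 1 - i.toNat by omega,
          seg_decomp s i.toNat j.toNat (by omega) (by omega),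
          interleave_sandwich]
      simp
  | case2 i j out hij =>
      intro hi hj
      rw [interleave_short (le_trans (List.length_take_le _ _) (by omega))]
      simp

-- ===== VERDICT (by name: the statement is the Claim_ definition above) =====
theorem minmax_sort_spec : Claim_equal_minmax_sort := by
  intro a _
  show minmax_sort a = minmax_sort_alt a
  unfold minmax_sort minmax_sort_alt
  rw [loopA_eq, altLoop_eq _ _ _ _ (le_refl 0)
      (by rw [PySem.List.length_sorted]; omega),
      show ((a.length : Int) - 1 + 1 - 0).toNat = a.length by omega]
  rw [show (0 : Int).toNat = 0 from rfl, List.drop_zero, ← PySem.List.length_sorted a (fun x => x) false,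
      List.take_length]
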